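-- pv_equiv track=rewrite | github.com/iFDVCS/spy-cy | encrypt_last_version.py | mkstr
-- ===== SOURCE A (Python) =====
-- def mkstr(prefix, nbr):
-- 	if len(prefix) == nbr:
-- 		return [prefix]
-- 	combs = []
-- 	combs.extend(mkstr(prefix + "A", nbr))
-- 	combs.extend(mkstr(prefix + "T", nbr))
-- 	combs.extend(mkstr(prefix + "G", nbr))
-- 	combs.extend(mkstr(prefix + "C", nbr))
-- 	return combs
-- ===== SOURCE B (Python) =====
-- from itertools import product
--
-- def mkstr(prefix, nbr):
--     n = nbr - len(prefix)
--     return [prefix + "".join(combo) for combo in product("ATGC", repeat=n)]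
-- ===== Notes on version B (the rewrite author's own statement) =====
-- stated objective: idiomatic
-- what changed: Replaced the 4-way tree recursion by a flat itertools.product enumeration over the remaining positions, joined onto the prefix in one comprehension.
import Mathlib
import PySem

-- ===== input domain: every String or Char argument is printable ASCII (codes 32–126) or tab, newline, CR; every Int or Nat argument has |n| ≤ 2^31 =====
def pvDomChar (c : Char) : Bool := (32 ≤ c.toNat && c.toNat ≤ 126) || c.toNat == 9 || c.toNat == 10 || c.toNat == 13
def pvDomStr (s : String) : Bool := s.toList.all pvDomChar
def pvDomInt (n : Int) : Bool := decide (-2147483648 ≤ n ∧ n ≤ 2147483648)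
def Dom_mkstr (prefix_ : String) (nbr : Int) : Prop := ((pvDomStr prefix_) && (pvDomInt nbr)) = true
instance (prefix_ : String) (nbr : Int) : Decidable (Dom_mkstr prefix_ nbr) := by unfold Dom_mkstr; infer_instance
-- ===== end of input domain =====

-- B replaces A's 4-way tree recursion by a flat product enumeration (same order, same cost); equal on Pre_ (len(prefix) <= nbr; elsewhere A recurses forever / RecursionError, B's product(repeat<0) raises ValueError).
-- ===== PORT A =====
-- fuel = remaining positions, a pure totality guard (Python recurses forever when len(prefix) > nbr: RecursionError, outside Pre_)
def mkstrGo (fuel : Nat) (prefix_ : String) (nbr : Int) : List String :=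
  if PySem.Str.len prefix_ = nbr then [prefix_]
  else match fuel with
  | 0 => []
  | f + 1 =>
    mkstrGo f (prefix_ ++ "A") nbr ++ mkstrGo f (prefix_ ++ "T") nbr ++
    mkstrGo f (prefix_ ++ "G") nbr ++ mkstrGo f (prefix_ ++ "C") nbr

def mkstr (prefix_ : String) (nbr : Int) : List String :=
  mkstrGo (nbr - PySem.Str.len prefix_).toNat prefix_ nbr

-- ===== PORT B =====
-- product("ATGC", repeat=n): n-tuples in A,T,G,C order, last position varying fastest
def prodATGC : Nat → List (List Char)
  | 0 => [[]]
  | n+1 => ['A', 'T', 'G', 'C'].flatMap (fun c => (prodATGC n).map (fun t => c :: t))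

def mkstr_alt (prefix_ : String) (nbr : Int) : List String :=
  if nbr < PySem.Str.len prefix_ then []  -- product(repeat<0) raises ValueError; totality guard, outside Pre_
  else (prodATGC (nbr - PySem.Str.len prefix_).toNat).map (fun t => prefix_ ++ String.ofList t)

-- ===== PRECONDITION & SPEC =====
-- Pre_ excludes len(prefix) > nbr, where A never terminates (RecursionError) and B raises ValueError.
def Pre_mkstr (prefix_ : String) (nbr : Int) : Prop := PySem.Str.len prefix_ ≤ nbr
instance (prefix_ : String) (nbr : Int) : Decidable (Pre_mkstr prefix_ nbr) := by unfold Pre_mkstr; infer_instance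
def pvWitness_mkstr : String × Int := ("AT", 3)
def Spec_mkstr (prefix_ : String) (nbr : Int) (out : List String) : Prop := out = mkstr_alt prefix_ nbr
instance (prefix_ : String) (nbr : Int) (out : List String) : Decidable (Spec_mkstr prefix_ nbr out) := by unfold Spec_mkstr; infer_instance

-- ===== CLAIM (what is proved, stated in full; the proofs are below) =====
def Claim_equal_mkstr : Prop := ∀ (prefix_ : String) (nbr : Int), Dom_mkstr prefix_ nbr → Pre_mkstr prefix_ nbr → Spec_mkstr prefix_ nbr (mkstr prefix_ nbr)

-- ===== LEMMAS AND PROOFS =====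
theorem mkstr_key : ∀ (n : Nat) (prefix_ : String) (nbr : Int),
    PySem.Str.len prefix_ + n = nbr →
    mkstrGo n prefix_ nbr = (prodATGC n).map (fun t => prefix_ ++ String.ofList t) := by
  intro n
  induction n with
  | zero =>
    intro prefix_ nbr h
    rw [mkstrGo, if_pos (by omega)]
    simp [prodATGC]
  | succ n ih =>
    intro prefix_ nbr h
    rw [mkstrGo, if_neg (by omega)]
    have step : ∀ c : Char, mkstrGo n (prefix_ ++ String.ofList [c]) nbr
        = (prodATGC n).map (fun t => prefix_ ++ String.ofList (c :: t)) := by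
      intro c
      rw [ih (prefix_ ++ String.ofList [c]) nbr (by simp only [PySem.Str.len_eq, String.toList_append, List.length_append, String.toList_ofList, List.length_cons, List.length_nil] at *; omega)]
      apply List.map_congr_left
      intro t _
      have : String.ofList (c :: t) = String.ofList [c] ++ String.ofList t := by
        simp [String.ext_iff]
      rw [this, String.append_assoc]
    show mkstrGo n (prefix_ ++ String.ofList ['A']) nbr ++ mkstrGo n (prefix_ ++ String.ofList ['T']) nbr ++
         mkstrGo n (prefix_ ++ String.ofList ['G']) nbr ++ mkstrGo n (prefix_ ++ String.ofList ['C']) nbr = _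
    rw [step 'A', step 'T', step 'G', step 'C']
    simp [prodATGC, Function.comp_def]

-- ===== VERDICT (by name: the statement is the Claim_ definition above) =====
theorem mkstr_spec : Claim_equal_mkstr := by
  intro prefix_ nbr _ hpre
  unfold Spec_mkstr mkstr_alt
  rw [if_neg (by unfold Pre_mkstr at hpre; omega)]
  rw [mkstr]
  exact mkstr_key _ prefix_ nbr (by unfold Pre_mkstr at hpre; omega)
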